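-- pv_equiv track=rewrite | github.com/szxxw/cs61a_2022 | extra_practice/tree_recursion/tree_recursion_practice2.py | scrabbler
-- ===== SOURCE A (Python) =====
-- def is_subseq(w1, w2):
--     """ Returns True if w1 is a subsequence of w2 and False otherwise.
--     >>> is_subseq("word", "word")
--     True
--     >>> is_subseq("compute", "computer")
--     True
--     >>> is_subseq("put", "computer")
--     True
--     >>> is_subseq("computer", "put")
--     False
--     >>> is_subseq("sin", "science")
--     True
--     >>> is_subseq("nice", "science")
--     False
--     >>> is_subseq("boot", "bottle")
--     False
--     """
--     if len(w1) == 0: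
--         return True
--     elif len(w2) == 0:
--         return False
--     elif len(w1) > len(w2):
--         return False
--     elif w1 == w2 :
--         return True
--     else:
--         with_elem = (w1[0] == w2[0]) and is_subseq(w1[1:], w2[1:])
--         without_elem = is_subseq(w1, w2[1:])
--         return with_elem or without_elem
--
-- def scrabbler(chars, words, values):
--     """ Given a list of words and point values for letters, returns a
--     dictionary mapping each word that can be formed from letters in chars
--     to their point value. You may not need all lines
--     >>> words = ["easy", "as", "pie"]
--     >>> values = {"e": 2, "a": 2, "s": 1, "p": 3, "i": 2, "y": 4}
--     >>> scrabbler("heuaiosby", words, values)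
--     {'easy': 9, 'as': 3}
--     >>> scrabbler("piayse", words, values)
--     {'pie': 7, 'as': 3}
--     """
--     result = {}
--     for word in words:
--         if is_subseq(word, chars):
--             value = 0
--             for letter in word:
--                 value += values[letter]
--             result[word] = value
--     return result
-- ===== SOURCE B (Python) =====
-- def scrabbler(chars, words, values):
--     # Greedy linear subsequence test: advance a pointer into word while
--     # scanning chars once; then build the result as dedup -> filter -> map.
--     def formable(word):
--         i = 0
--         for ch in chars:
--             if i < len(word) and word[i] == ch:
--                 i += 1
--         return i == len(word)
--
--     return {w: sum(values[c] for c in w)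
--             for w in dict.fromkeys(words) if formable(w)}
-- ===== Notes on version B (the rewrite author's own statement) =====
-- stated objective: alternative
-- what changed: Replaces the exponential branching recursion is_subseq by a greedy one-pass pointer scan over chars, and replaces the imperative dict-insert loop by a staged dedup (dict.fromkeys) -> filter -> comprehension pipeline.
import Mathlib
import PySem

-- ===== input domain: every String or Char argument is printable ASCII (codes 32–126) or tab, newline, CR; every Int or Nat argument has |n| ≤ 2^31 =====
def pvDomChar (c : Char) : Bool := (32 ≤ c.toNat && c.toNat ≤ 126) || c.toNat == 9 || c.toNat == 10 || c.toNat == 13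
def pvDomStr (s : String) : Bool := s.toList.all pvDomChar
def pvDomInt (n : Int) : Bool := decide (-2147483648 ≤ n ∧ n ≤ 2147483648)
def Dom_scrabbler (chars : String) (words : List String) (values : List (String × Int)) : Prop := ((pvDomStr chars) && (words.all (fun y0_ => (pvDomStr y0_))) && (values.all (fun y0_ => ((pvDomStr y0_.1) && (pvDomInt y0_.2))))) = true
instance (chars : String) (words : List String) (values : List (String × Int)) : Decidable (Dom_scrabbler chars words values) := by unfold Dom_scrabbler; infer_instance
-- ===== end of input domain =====

-- B replaces the exponential branching recursion is_subseq by a greedy one-pass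
-- pointer scan over chars, and the imperative dict-insert loop by a staged
-- dedup (dict.fromkeys) -> filter -> comprehension pipeline.


-- ===== PORT A =====
-- literal port of is_subseq (branching recursion; both recursive calls shrink w2)
def isSubseqA : List Char → List Char → Bool
  | [], _ => true
  | _ :: _, [] => false
  | a :: t1, b :: t2 =>
    if (a :: t1).length > (b :: t2).length then false
    else if a :: t1 = b :: t2 then true
    else ((a == b) && isSubseqA t1 t2) || isSubseqA (a :: t1) t2
termination_by _ w2 => w2.length

-- values[letter]: under Pre_scrabbler the key is present, so getD's default is never used
def scrabbler (chars : String) (words : List String) (values : List (String × Int)) : List (String × Int) :=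
  let vd := PySem.Dict.ofList values
  (words.foldl (fun r w =>
    if isSubseqA w.toList chars.toList then
      r.insert w (w.toList.foldl (fun v c => v + vd.getD (String.singleton c) 0) 0)
    else r) PySem.Dict.empty).items

-- ===== PORT B =====
-- Source B's formable: the pointer i into word is ported as the remaining suffix
-- word[i:] (i == len(word) ↔ the suffix is empty); one fold over chars.
def formableB (w : List Char) (cs : List Char) : Bool :=
  (cs.foldl (fun rem ch =>
    match rem with
    | [] => []
    | x :: t => if x == ch then t else x :: t) w).isEmpty

-- dict.fromkeys(words) = PySem.List.dedup; the comprehension's keys are then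
-- distinct, so the resulting dict is the mapped association list itself.
def scrabbler_alt (chars : String) (words : List String) (values : List (String × Int)) : List (String × Int) :=
  let vd := PySem.Dict.ofList values
  ((PySem.List.dedup words).filter (fun w => formableB w.toList chars.toList)).map
    (fun w => (w, (w.toList.map (fun c => vd.getD (String.singleton c) 0)).sum))

-- ===== PRECONDITION & SPEC =====
-- Pre_ excludes exactly the inputs where Python A raises KeyError: a word formable
-- from chars containing a letter that is not a key of values.
def Pre_scrabbler (chars : String) (words : List String) (values : List (String × Int)) : Prop :=
  (words.all (fun w => !(w.toList.isSublist chars.toList) ||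
     w.toList.all (fun c => (PySem.Dict.ofList values).contains (String.singleton c)))) = true
instance (chars : String) (words : List String) (values : List (String × Int)) : Decidable (Pre_scrabbler chars words values) := by unfold Pre_scrabbler; infer_instance
def pvWitness_scrabbler : String × List String × (List (String × Int)) :=
  ("as", ["as"], [("a", 2), ("s", 1)])

def Spec_scrabbler (chars : String) (words : List String) (values : List (String × Int)) (out : List (String × Int)) : Prop := out = scrabbler_alt chars words values
instance (chars : String) (words : List String) (values : List (String × Int)) (out : List (String × Int)) : Decidable (Spec_scrabbler chars words values out) := by unfold Spec_scrabbler; infer_instance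

-- ===== CLAIM (what is proved, stated in full; the proofs are below) =====
def Claim_equal_scrabbler : Prop := ∀ (chars : String) (words : List String) (values : List (String × Int)), Dom_scrabbler chars words values → Pre_scrabbler chars words values → Spec_scrabbler chars words values (scrabbler chars words values)

-- ===== LEMMAS AND PROOFS =====

theorem isSubseqA_iff (w1 w2 : List Char) : isSubseqA w1 w2 = true ↔ w1.Sublist w2 := by
  induction w2 generalizing w1 with
  | nil => cases w1 <;> simp [isSubseqA]
  | cons b t2 ih =>
    cases w1 with
    | nil => simp [isSubseqA]
    | cons a t1 =>
      rw [isSubseqA]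
      by_cases hlen : (a :: t1).length > (b :: t2).length
      · simp only [if_pos hlen]
        constructor
        · intro h; cases h
        · intro hs; exact absurd hs.length_le (by omega)
      · by_cases heq : a :: t1 = b :: t2
        · rw [heq]; simp [List.Sublist.refl]
        · simp only [if_neg hlen, if_neg heq, Bool.or_eq_true, Bool.and_eq_true, beq_iff_eq, ih]
          constructor
          · rintro (⟨rfl, hs⟩ | hs)
            · exact hs.cons₂ a
            · exact hs.cons b
          · intro hs
            cases hs with
            | cons _ hs => exact Or.inr hs
            | cons₂ _ hs => exact Or.inl ⟨rfl, hs⟩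

theorem formableB_step_nil (cs : List Char) :
    cs.foldl (fun rem ch =>
      match rem with
      | [] => ([] : List Char)
      | x :: t => if x == ch then t else x :: t) [] = [] := by
  induction cs with
  | nil => rfl
  | cons c t ih => simpa using ih

theorem formableB_nil (cs : List Char) : formableB [] cs = true := by
  unfold formableB
  rw [formableB_step_nil]
  rfl

theorem formableB_iff (w cs : List Char) : formableB w cs = true ↔ w.Sublist cs := by
  induction cs generalizing w with
  | nil => cases w <;> simp [formableB]
  | cons c t ih =>
    cases w with
    | nil => simp [formableB_nil, List.nil_sublist]
    | cons x r =>
      by_cases h : x = c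
      · subst h
        simpa [formableB, List.cons_sublist_cons] using ih r
      · have : formableB (x :: r) (c :: t) = formableB (x :: r) t := by
          simp [formableB, h]
        rw [this, ih]
        constructor
        · exact fun hs => hs.cons c
        · intro hs
          cases hs with
          | cons _ hs => exact hs
          | cons₂ => exact absurd rfl h

theorem formableB_eq (w cs : List Char) : isSubseqA w cs = formableB w cs := by
  rw [Bool.eq_iff_iff, isSubseqA_iff, formableB_iff]

theorem sum_eq_foldl (vd : PySem.Dict String Int) (l : List Char) :
    l.foldl (fun v c => v + vd.getD (String.singleton c) 0) 0
      = (l.map (fun c => vd.getD (String.singleton c) 0)).sum := by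
  simpa using PySem.List.foldl_add l (fun c => vd.getD (String.singleton c) 0) 0

-- inserting an already-present key with its already-stored value leaves the dict unchanged
theorem insert_same (d : PySem.Dict String Int) (f : String → Int) (w : String)
    (H : ∀ p ∈ d.items, p.2 = f p.1) (hc : d.contains w = true) :
    d.insert w (f w) = d := by
  apply PySem.Dict.ext
  rw [PySem.Dict.items_insert_of_contains d (f w) hc]
  conv_rhs => rw [← List.map_id d.items]
  apply List.map_congr_left
  intro p hp
  by_cases h : p.1 = w
  · have := H p hp
    simp only [h, beq_self_eq_true, if_pos]
    cases p with
    | mk k v => simp_all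
  · simp [h]

theorem discard_eq (s : List String) (x : String) :
    PySem.Set.discard s x = s.filter (fun y => !(y == x)) := rfl

-- Set.ofList commutes with filter (dedup of a filtered list = filtered dedup)
theorem ofList_filter (q : String → Bool) (l : List String) :
    PySem.Set.ofList (l.filter q) = (PySem.Set.ofList l).filter q := by
  induction l with
  | nil => rfl
  | cons x t ih =>
    rw [List.filter_cons]
    by_cases hq : q x = true
    · rw [if_pos hq, PySem.Set.ofList_cons, PySem.Set.ofList_cons, List.filter_cons,
        if_pos hq, ih, discard_eq, discard_eq]
      congr 1
      rw [List.filter_filter, List.filter_filter]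
      exact List.filter_congr (fun y _ => by rw [Bool.and_comm])
    · have hq' : q x = false := by simpa using hq
      rw [if_neg hq, ih, PySem.Set.ofList_cons, List.filter_cons, if_neg (by simp [hq']),
        discard_eq, List.filter_filter]
      refine List.filter_congr (fun y _ => ?_)
      by_cases hy : q y = true
      · have : ¬ (y == x) = true := by
          simp only [beq_iff_eq]
          rintro rfl; rw [hy] at hq'; cases hq'
        simp [hy, this]
      · simp [by simpa using hy]

-- dropping an element the filter rejects anyway changes nothing
theorem filter_discard (s : List String) (P : String → Bool) (w : String)
    (hp : P w = false) :
    (PySem.Set.discard s w).filter P = s.filter P := by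
  rw [discard_eq, List.filter_filter]
  refine List.filter_congr (fun y _ => ?_)
  by_cases hy : P y = true
  · have : ¬ (y == w) = true := by
      simp only [beq_iff_eq]
      rintro rfl; rw [hy] at hp; cases hp
    simp [hy, this]
  · simp [by simpa using hy]

-- the main loop invariant: A's dict fold appends exactly the new formable words
theorem main_inv (P : String → Bool) (f : String → Int) :
    ∀ (ws : List String) (d : PySem.Dict String Int),
    d.keys.Nodup → (∀ p ∈ d.items, p.2 = f p.1) →
    (ws.foldl (fun r w => if P w then r.insert w (f w) else r) d).items
      = d.items ++ ((PySem.Set.ofList (ws.filter (fun w => !(d.contains w)))).filter P).map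
          (fun w => (w, f w)) := by
  intro ws
  induction ws with
  | nil => intro d _ _; simp
  | cons w t ih =>
    intro d hnd H
    rw [List.foldl_cons, List.filter_cons]
    by_cases hc : d.contains w = true
    · have hstep : (if P w then d.insert w (f w) else d) = d := by
        by_cases hp : P w <;> simp [hp, insert_same d f w H hc]
      rw [hstep, show (!(d.contains w)) = false by simp [hc], if_neg (by simp)]
      exact ih d hnd H
    · have hcf : d.contains w = false := by simpa using hc
      rw [show (!(d.contains w)) = true by simp [hcf], if_pos rfl, PySem.Set.ofList_cons]
      by_cases hp : P w = true
      · rw [if_pos hp]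
        have hnd' := PySem.Dict.nodup_keys_insert d w (f w) hnd
        have H' : ∀ p ∈ (d.insert w (f w)).items, p.2 = f p.1 := by
          intro p hmem
          rw [PySem.Dict.mem_items_insert] at hmem
          rcases hmem with rfl | ⟨hmem, _⟩
          · rfl
          · exact H p hmem
        rw [ih (d.insert w (f w)) hnd' H',
            PySem.Dict.items_insert_of_not_contains d (f w) hcf]
        have hfilt : t.filter (fun y => !((d.insert w (f w)).contains y))
            = PySem.Set.discard (t.filter (fun y => !(d.contains y))) w := by
          show _ = List.filter (fun y => !(y == w)) (t.filter _)
          rw [List.filter_filter]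
          refine List.filter_congr (fun y _ => ?_)
          rw [PySem.Dict.contains_insert, Bool.not_or, Bool.and_comm]
        rw [hfilt]
        show _ = d.items ++ List.map _ (List.filter P (w :: PySem.Set.discard (PySem.Set.ofList (t.filter fun y => !(d.contains y))) w))
        rw [List.filter_cons, if_pos hp, List.map_cons, List.append_assoc]
        have : PySem.Set.discard (t.filter (fun y => !(d.contains y))) w
            = (t.filter (fun y => !(d.contains y))).filter (fun y => !(y == w)) := rfl
        rw [this, ofList_filter]
        rfl
      · have hp' : P w = false := by simpa using hp
        rw [if_neg hp, ih d hnd H]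
        show _ = d.items ++ List.map _ (List.filter P (w :: PySem.Set.discard _ w))
        rw [List.filter_cons, if_neg (by simp [hp']), filter_discard _ _ _ hp']

-- ===== VERDICT (by name: the statement is the Claim_ definition above) =====
theorem scrabbler_spec : Claim_equal_scrabbler := by
  intro chars words values _ _
  unfold Spec_scrabbler
  simp only [scrabbler, scrabbler_alt]
  rw [main_inv (fun w => isSubseqA w.toList chars.toList)
      (fun w => w.toList.foldl
        (fun v c => v + (PySem.Dict.ofList values).getD (String.singleton c) 0) 0)
      words PySem.Dict.empty PySem.Dict.nodup_keys_empty
      (by intro p hp; simp [PySem.Dict.empty ] at hp)]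
  simp only [PySem.Dict.contains_empty, Bool.not_false, List.filter_true,
    PySem.List.dedup_eq_ofList, formableB_eq, sum_eq_foldl]
  rfl
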